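-- pv_equiv track=rewrite | github.com/NicksName290/Nicks_Yatch-Dice2 | funcoes.py | calcula_pontos_regra_avancada
-- ===== SOURCE A (Python) =====
-- def calcula_pontos_soma(l):
--   soma = 0
--   for pnt in l:
--     soma += pnt
--   return soma
--
-- def calcula_pontos_sequencia_baixa(lista):
--    for i in lista:
--       if i+1 in lista and i+2 in lista and i+3 in lista:
--          return 15
--    return 0
--
-- def calcula_pontos_sequencia_alta(lista):
--    for i in lista:
--       if i+1 in lista and i+2 in lista and i+3 in lista and i+4 in lista:
--          return 30
--    return 0
--
-- def calcula_pontos_full_house(lista):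
--    dupla = False
--    maior_dupla = 0
--    trio = False
--    maior_trio = 0
--    soma = 0
--    for i in lista:
--       if lista.count(i) == 2:
--          dupla = True
--          if i > maior_dupla:
--             soma -= maior_dupla*2
--             maior_dupla = i
--             soma += maior_dupla*2
--       if lista.count(i) == 3:
--          trio = True
--          if i > maior_trio:
--             soma -= maior_trio*3
--             maior_trio = i
--             soma += maior_trio*3
--    if trio == True and dupla == True:
--       return soma
--    return 0
--
-- def calcula_pontos_quadra(l):
--    soma = 0
--    sim = False
--    for i in l:
--       soma += i
--       if l.count(i) >= 4:
--         sim = True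
--    if sim == True :
--       return soma
--    return 0
--
-- def calcula_pontos_quina(l):
--    for i in l:
--       if l.count(i) >= 5:
--          return 50
--    return 0
--
-- def calcula_pontos_regra_avancada(l):
--    dic = {}
--    soma = 0
--    for i in l:
--       soma += i
--    dic['cinco_iguais'] = calcula_pontos_quina(l)
--    dic['full_house'] = calcula_pontos_full_house(l)
--    dic['quadra'] = calcula_pontos_quadra(l)
--    dic['sem_combinacao'] = calcula_pontos_soma(l)
--    dic['sequencia_alta'] = calcula_pontos_sequencia_alta(l)
--    dic['sequencia_baixa'] = calcula_pontos_sequencia_baixa(l)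
--    return dic
-- ===== SOURCE B (Python) =====
-- def calcula_pontos_regra_avancada(l):
--     cnt = {}
--     for v in l:
--         cnt[v] = cnt.get(v, 0) + 1
--     total = sum(l)
--     quina = 50 if any(c >= 5 for c in cnt.values()) else 0
--     quadra = total if any(c >= 4 for c in cnt.values()) else 0
--     pares = [v for v, c in cnt.items() if c == 2]
--     trios = [v for v, c in cnt.items() if c == 3]
--     fh = 2 * max(0, max(pares)) + 3 * max(0, max(trios)) if pares and trios else 0
--     vals = set(cnt)
--     seq_b = 15 if any(v + 1 in vals and v + 2 in vals and v + 3 in vals for v in vals) else 0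
--     seq_a = 30 if any(v + 1 in vals and v + 2 in vals and v + 3 in vals and v + 4 in vals for v in vals) else 0
--     return {'cinco_iguais': quina, 'full_house': fh, 'quadra': quadra,
--             'sem_combinacao': total, 'sequencia_alta': seq_a, 'sequencia_baixa': seq_b}
-- ===== Notes on version B (the rewrite author's own statement) =====
-- stated objective: faster
-- what changed: A's six helpers each rescan the list, calling list.count inside loops (quadratic); B builds one counter dict and a value set in a single pass and derives every category (quina/quadra from counts, full house from max pair/triple values, sequences from set membership) by indexing that table.
import Mathlib
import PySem

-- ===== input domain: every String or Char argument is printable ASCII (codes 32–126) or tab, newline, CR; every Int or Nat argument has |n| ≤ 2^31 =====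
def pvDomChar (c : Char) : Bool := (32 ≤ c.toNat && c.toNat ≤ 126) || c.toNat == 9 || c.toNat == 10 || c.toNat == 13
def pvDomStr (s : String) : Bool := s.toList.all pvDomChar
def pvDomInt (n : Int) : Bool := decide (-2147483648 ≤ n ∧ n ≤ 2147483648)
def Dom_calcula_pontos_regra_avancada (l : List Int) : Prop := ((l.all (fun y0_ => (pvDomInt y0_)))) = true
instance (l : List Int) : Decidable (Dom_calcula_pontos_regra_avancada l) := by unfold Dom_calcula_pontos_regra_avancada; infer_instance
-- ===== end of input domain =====

-- B replaces A's six independent list-rescanning helpers by one counter table built in a single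
-- pass, from which every scoring category is derived; objective: faster (measured; A rescans with list.count, quadratic).


-- ===== PORT A =====
def calcula_pontos_soma (l : List Int) : Int :=
  l.foldl (fun soma pnt => soma + pnt) 0

def pvSeqBaixaLoop (lista : List Int) : List Int → Int
  | [] => 0
  | i :: rest =>
    if i + 1 ∈ lista ∧ i + 2 ∈ lista ∧ i + 3 ∈ lista then 15
    else pvSeqBaixaLoop lista rest

def calcula_pontos_sequencia_baixa (lista : List Int) : Int :=
  pvSeqBaixaLoop lista lista

def pvSeqAltaLoop (lista : List Int) : List Int → Int
  | [] => 0
  | i :: rest =>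
    if i + 1 ∈ lista ∧ i + 2 ∈ lista ∧ i + 3 ∈ lista ∧ i + 4 ∈ lista then 30
    else pvSeqAltaLoop lista rest

def calcula_pontos_sequencia_alta (lista : List Int) : Int :=
  pvSeqAltaLoop lista lista

-- loop state s = (dupla, maior_dupla, trio, maior_trio, soma), exactly A's five variables
def pvFullHouseLoop (lista : List Int) : List Int → (Bool × Int × Bool × Int × Int) → (Bool × Int × Bool × Int × Int)
  | [], s => s
  | i :: rest, s =>
      let p : Bool × Int × Int :=
        if PySem.List.count lista i = 2 then
          (if s.2.1 < i then (true, i, s.2.2.2.2 - s.2.1 * 2 + i * 2)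
           else (true, s.2.1, s.2.2.2.2))
        else (s.1, s.2.1, s.2.2.2.2)
      let q : Bool × Int × Int :=
        if PySem.List.count lista i = 3 then
          (if s.2.2.2.1 < i then (true, i, p.2.2 - s.2.2.2.1 * 3 + i * 3)
           else (true, s.2.2.2.1, p.2.2))
        else (s.2.2.1, s.2.2.2.1, p.2.2)
      pvFullHouseLoop lista rest (p.1, p.2.1, q.1, q.2.1, q.2.2)

def calcula_pontos_full_house (lista : List Int) : Int :=
  let st := pvFullHouseLoop lista lista (false, 0, false, 0, 0)
  if st.2.2.1 = true ∧ st.1 = true then st.2.2.2.2 else 0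

def pvQuadraLoop (l : List Int) : List Int → (Int × Bool) → (Int × Bool)
  | [], s => s
  | i :: rest, s => pvQuadraLoop l rest (s.1 + i, if 4 ≤ PySem.List.count l i then true else s.2)

def calcula_pontos_quadra (l : List Int) : Int :=
  let st := pvQuadraLoop l l (0, false)
  if st.2 = true then st.1 else 0

def pvQuinaLoop (l : List Int) : List Int → Int
  | [] => 0
  | i :: rest => if 5 ≤ PySem.List.count l i then 50 else pvQuinaLoop l rest

def calcula_pontos_quina (l : List Int) : Int := pvQuinaLoop l l

def calcula_pontos_regra_avancada (l : List Int) : List (String × Int) :=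
  let _soma := l.foldl (fun soma i => soma + i) 0
  ((((((PySem.Dict.empty.insert "cinco_iguais" (calcula_pontos_quina l)).insert
      "full_house" (calcula_pontos_full_house l)).insert
      "quadra" (calcula_pontos_quadra l)).insert
      "sem_combinacao" (calcula_pontos_soma l)).insert
      "sequencia_alta" (calcula_pontos_sequencia_alta l)).insert
      "sequencia_baixa" (calcula_pontos_sequencia_baixa l)).items

-- ===== PORT B =====
def calcula_pontos_regra_avancada_alt (l : List Int) : List (String × Int) :=
  let cnt : PySem.Dict Int Int :=
    l.foldl (fun d v => d.insert v (d.getD v 0 + 1)) PySem.Dict.empty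
  let total := l.sum
  let quina : Int := if cnt.values.any (fun c => decide (5 ≤ c)) then 50 else 0
  let quadra : Int := if cnt.values.any (fun c => decide (4 ≤ c)) then total else 0
  let pares := (cnt.items.filter (fun p => p.2 == 2)).map (fun p => p.1)
  let trios := (cnt.items.filter (fun p => p.2 == 3)).map (fun p => p.1)
  let fh : Int :=
    if pares ≠ [] ∧ trios ≠ [] then
      2 * max 0 ((PySem.List.max? pares (fun y => y)).getD 0)
        + 3 * max 0 ((PySem.List.max? trios (fun y => y)).getD 0)
    else 0
  let vals : PySem.Set Int := PySem.Set.ofList cnt.keys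
  let seq_b : Int :=
    if vals.any (fun v => decide (v + 1 ∈ vals ∧ v + 2 ∈ vals ∧ v + 3 ∈ vals)) then 15 else 0
  let seq_a : Int :=
    if vals.any (fun v => decide (v + 1 ∈ vals ∧ v + 2 ∈ vals ∧ v + 3 ∈ vals ∧ v + 4 ∈ vals)) then 30 else 0
  [("cinco_iguais", quina), ("full_house", fh), ("quadra", quadra),
   ("sem_combinacao", total), ("sequencia_alta", seq_a), ("sequencia_baixa", seq_b)]

-- ===== PRECONDITION & SPEC =====
def Spec_calcula_pontos_regra_avancada (l : List Int) (out : List (String × Int)) : Prop := out = calcula_pontos_regra_avancada_alt l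
instance (l : List Int) (out : List (String × Int)) : Decidable (Spec_calcula_pontos_regra_avancada l out) := by unfold Spec_calcula_pontos_regra_avancada; infer_instance

-- ===== CLAIM (what is proved, stated in full; the proofs are below) =====
def Claim_equal_calcula_pontos_regra_avancada : Prop := ∀ (l : List Int), Dom_calcula_pontos_regra_avancada l → Spec_calcula_pontos_regra_avancada l (calcula_pontos_regra_avancada l)

-- ===== LEMMAS AND PROOFS =====

theorem pv_soma_eq (l : List Int) : calcula_pontos_soma l = l.sum := by
  rw [List.sum_eq_foldl]; rfl

theorem pv_counter_any (l : List Int) (n : Int) :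
    ((PySem.Dict.counter l).values.any (fun c => decide (n ≤ c)))
      = l.any (fun i => decide (n ≤ (List.count i l : Int))) := by
  rw [Bool.eq_iff_iff]
  simp [PySem.Dict.values, PySem.Dict.items_counter, List.any_eq_true,
    PySem.Set.mem_ofList, PySem.List.count_eq]

theorem pv_quina_loop (l rest : List Int) :
    pvQuinaLoop l rest = if rest.any (fun i => decide (5 ≤ List.count i l)) then 50 else 0 := by
  induction rest with
  | nil => simp [pvQuinaLoop]
  | cons i rest ih =>
    simp only [pvQuinaLoop, List.any_cons, PySem.List.count_eq, ih]
    by_cases h : 5 ≤ List.count i l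
    · simp [h]
    · simp [h]

theorem pv_quina_eq (l : List Int) :
    calcula_pontos_quina l =
      (if ((PySem.Dict.counter l).values.any (fun c => decide (5 ≤ c))) then 50 else 0) := by
  have hx := PySem.List.any_congr_mem (l := l)
    (f := fun i => decide (5 ≤ List.count i l))
    (g := fun i => decide ((5:Int) ≤ (List.count i l : Int)))
    (by intro x _; simp only [decide_eq_decide]; omega)
  rw [calcula_pontos_quina, pv_quina_loop, pv_counter_any, hx]

theorem pv_quadra_loop (l : List Int) :
    ∀ (rest : List Int) (a : Int) (b : Bool),
      pvQuadraLoop l rest (a, b)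
        = (a + rest.sum, b || rest.any (fun i => decide (4 ≤ List.count i l))) := by
  intro rest
  induction rest with
  | nil => simp [pvQuadraLoop]
  | cons i rest ih =>
    intro a b
    simp only [pvQuadraLoop, List.any_cons, List.sum_cons, PySem.List.count_eq, ih]
    by_cases h : 4 ≤ List.count i l
    · simp [h, add_assoc]
    · simp [h, add_assoc]

theorem pv_quadra_eq (l : List Int) :
    calcula_pontos_quadra l =
      (if ((PySem.Dict.counter l).values.any (fun c => decide (4 ≤ c))) then l.sum else 0) := by
  have hx := PySem.List.any_congr_mem (l := l)
    (f := fun i => decide (4 ≤ List.count i l))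
    (g := fun i => decide ((4:Int) ≤ (List.count i l : Int)))
    (by intro x _; simp only [decide_eq_decide]; omega)
  rw [calcula_pontos_quadra]
  rw [pv_quadra_loop, pv_counter_any]
  simp only [Bool.false_or, zero_add, hx]

theorem pv_seqb_loop (lista rest : List Int) :
    pvSeqBaixaLoop lista rest
      = if rest.any (fun i => decide (i + 1 ∈ lista ∧ i + 2 ∈ lista ∧ i + 3 ∈ lista)) then 15 else 0 := by
  induction rest with
  | nil => simp [pvSeqBaixaLoop]
  | cons i rest ih =>
    simp only [pvSeqBaixaLoop, List.any_cons, ih]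
    by_cases h : i + 1 ∈ lista ∧ i + 2 ∈ lista ∧ i + 3 ∈ lista
    · simp [h]
    · simp [h]

theorem pv_seqa_loop (lista rest : List Int) :
    pvSeqAltaLoop lista rest
      = if rest.any (fun i => decide (i + 1 ∈ lista ∧ i + 2 ∈ lista ∧ i + 3 ∈ lista ∧ i + 4 ∈ lista)) then 30 else 0 := by
  induction rest with
  | nil => simp [pvSeqAltaLoop]
  | cons i rest ih =>
    simp only [pvSeqAltaLoop, List.any_cons, ih]
    by_cases h : i + 1 ∈ lista ∧ i + 2 ∈ lista ∧ i + 3 ∈ lista ∧ i + 4 ∈ lista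
    · simp [h]
    · simp [h]

theorem pv_vals_eq (l : List Int) :
    (PySem.Set.ofList (PySem.Dict.counter l).keys : PySem.Set Int) = PySem.Set.ofList l := by
  rw [PySem.Dict.keys_counter]
  exact PySem.Set.ofList_eq_self_of_nodup _ (PySem.Set.nodup_ofList l)

theorem pv_seqb_eq (l : List Int) :
    calcula_pontos_sequencia_baixa l
      = (if ((PySem.Set.ofList (PySem.Dict.counter l).keys : PySem.Set Int).any
            (fun v => decide (v + 1 ∈ (PySem.Set.ofList (PySem.Dict.counter l).keys : PySem.Set Int)
              ∧ v + 2 ∈ (PySem.Set.ofList (PySem.Dict.counter l).keys : PySem.Set Int)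
              ∧ v + 3 ∈ (PySem.Set.ofList (PySem.Dict.counter l).keys : PySem.Set Int)))) then 15 else 0) := by
  rw [calcula_pontos_sequencia_baixa, pv_seqb_loop, pv_vals_eq]
  congr 1
  rw [Bool.eq_iff_iff]
  simp [List.any_eq_true, PySem.Set.mem_ofList]

theorem pv_seqa_eq (l : List Int) :
    calcula_pontos_sequencia_alta l
      = (if ((PySem.Set.ofList (PySem.Dict.counter l).keys : PySem.Set Int).any
            (fun v => decide (v + 1 ∈ (PySem.Set.ofList (PySem.Dict.counter l).keys : PySem.Set Int)
              ∧ v + 2 ∈ (PySem.Set.ofList (PySem.Dict.counter l).keys : PySem.Set Int)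
              ∧ v + 3 ∈ (PySem.Set.ofList (PySem.Dict.counter l).keys : PySem.Set Int)
              ∧ v + 4 ∈ (PySem.Set.ofList (PySem.Dict.counter l).keys : PySem.Set Int)))) then 30 else 0) := by
  rw [calcula_pontos_sequencia_alta, pv_seqa_loop, pv_vals_eq]
  congr 1
  rw [Bool.eq_iff_iff]
  simp [List.any_eq_true, PySem.Set.mem_ofList]

-- the full-house loop invariant: soma is always 2*maior_dupla + 3*maior_trio
theorem pv_fh_loop (lista : List Int) :
    ∀ (rest : List Int) (d : Bool) (md : Int) (t : Bool) (mt : Int) (soma : Int),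
      soma = 2 * md + 3 * mt →
      pvFullHouseLoop lista rest (d, md, t, mt, soma)
        = (d || rest.any (fun i => decide (List.count i lista = 2)),
           rest.foldl (fun m i => if List.count i lista = 2 then (if m < i then i else m) else m) md,
           t || rest.any (fun i => decide (List.count i lista = 3)),
           rest.foldl (fun m i => if List.count i lista = 3 then (if m < i then i else m) else m) mt,
           2 * (rest.foldl (fun m i => if List.count i lista = 2 then (if m < i then i else m) else m) md)
             + 3 * (rest.foldl (fun m i => if List.count i lista = 3 then (if m < i then i else m) else m) mt)) := by
  intro rest
  induction rest with
  | nil => intro d md t mt soma hs; subst hs; simp [pvFullHouseLoop]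
  | cons i rest ih =>
    intro d md t mt soma hs
    subst hs
    simp only [pvFullHouseLoop, List.foldl_cons, List.any_cons, PySem.List.count_eq]
    by_cases h2 : List.count i lista = 2
    · by_cases h3 : List.count i lista = 3
      · rw [h2] at h3; exact absurd h3 (by decide)
      · by_cases hd : md < i
        · simp only [h2, h3]
          simp [hd]
          rw [ih _ _ _ _ _ (by ring)]
          simp [h2, h3, hd]
        · simp only [h2, h3]
          simp [hd]
          rw [ih _ _ _ _ _ (by ring)]
          simp [h2, h3, hd]
    · by_cases h3 : List.count i lista = 3
      · by_cases ht : mt < i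
        · simp only [h2, h3]
          simp [ht]
          rw [ih _ _ _ _ _ (by ring)]
          simp [h2, h3, ht]
        · simp only [h2, h3]
          simp [ht]
          rw [ih _ _ _ _ _ (by ring)]
          simp [h2, h3, ht]
      · simp only [h2, h3]
        simp
        rw [ih _ _ _ _ _ (by ring)]

theorem pv_pares_eq (l : List Int) (n : Int) :
    (((PySem.Dict.counter l).items.filter (fun p => p.2 == n)).map (fun p => p.1))
      = (PySem.Set.ofList l).filter (fun k => (List.count k l : Int) == n) := by
  simp [PySem.Dict.items_counter, List.filter_map, List.map_map, Function.comp_def,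
    PySem.List.count_eq, List.map_id']

theorem pv_pares_ne_nil (l : List Int) (n : Nat) :
    ((PySem.Set.ofList l).filter (fun k => (List.count k l : Int) == (n : Int)) ≠ [])
      ↔ l.any (fun i => decide (List.count i l = n)) = true := by
  rw [Ne, List.filter_eq_nil_iff]
  simp only [List.any_eq_true, PySem.Set.mem_ofList, beq_iff_eq, decide_eq_true_eq, not_forall]
  constructor
  · rintro ⟨x, hx, h⟩
    exact ⟨x, hx, by exact_mod_cast not_not.mp h⟩
  · rintro ⟨x, hx, h⟩
    exact ⟨x, hx, by simp; exact_mod_cast h⟩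

theorem pv_foldl_max_eq (xs ys : List Int) (h : ∀ x : Int, x ∈ xs ↔ x ∈ ys) (hne : ys ≠ []) :
    xs.foldl (fun m i => max m i) 0
      = max 0 ((PySem.List.max? ys (fun y => y)).getD 0) := by
  obtain ⟨y, t, rfl⟩ := List.exists_cons_of_ne_nil hne
  rw [PySem.List.max?_id_cons]
  simp only [Option.getD_some]
  have hxs1 := PySem.List.le_foldl_max xs (0 : Int)
  have hxs2 := PySem.List.foldl_max_mem xs (0 : Int)
  have hys1 := PySem.List.le_foldl_max t y
  have hys2 := PySem.List.foldl_max_mem t y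
  have hNmem : t.foldl max y ∈ y :: t := by
    rcases hys2 with h' | h'
    · rw [h']; exact List.mem_cons_self
    · exact List.mem_cons_of_mem _ h'
  have hNub : ∀ z ∈ y :: t, z ≤ t.foldl max y := by
    intro z hz
    rcases List.mem_cons.mp hz with rfl | hz'
    · exact hys1.1
    · exact hys1.2 z hz'
  apply le_antisymm
  · rcases hxs2 with h' | h'
    · rw [h']; exact le_max_left _ _
    · exact le_trans (hNub _ ((h _).mp h')) (le_max_right _ _)
  · apply max_le
    · exact hxs1.1
    · exact hxs1.2 _ ((h _).mpr hNmem)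

theorem pv_max_eq (l : List Int) (n : Nat)
    (hne : ((PySem.Set.ofList l).filter (fun k => (List.count k l : Int) == (n : Int))) ≠ []) :
    l.foldl (fun m i => if List.count i l = n then (if m < i then i else m) else m) 0
      = max 0 ((PySem.List.max? ((PySem.Set.ofList l).filter (fun k => (List.count k l : Int) == (n : Int)))
          (fun y => y)).getD 0) := by
  have hstep : (fun (m i : Int) => if List.count i l = n then (if m < i then i else m) else m)
      = fun m i => if List.count i l = n then max m i else m := by
    funext m i
    rcases lt_or_ge m i with h | h
    · simp [h, max_eq_right h.le]
    · simp [not_lt.mpr h, max_eq_left h]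
  rw [hstep, PySem.List.foldl_ite_eq_foldl_filter]
  apply pv_foldl_max_eq _ _ _ hne
  intro x
  simp only [List.mem_filter, PySem.Set.mem_ofList, beq_iff_eq, decide_eq_true_eq]
  constructor
  · rintro ⟨h1, h2⟩; exact ⟨h1, by exact_mod_cast h2⟩
  · rintro ⟨h1, h2⟩; exact ⟨h1, by exact_mod_cast h2⟩

theorem pv_fh_eq (l : List Int) :
    calcula_pontos_full_house l =
      (if (((PySem.Dict.counter l).items.filter (fun p => p.2 == 2)).map (fun p => p.1) ≠ []
          ∧ ((PySem.Dict.counter l).items.filter (fun p => p.2 == 3)).map (fun p => p.1) ≠ []) then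
        2 * max 0 ((PySem.List.max? (((PySem.Dict.counter l).items.filter (fun p => p.2 == 2)).map (fun p => p.1)) (fun y => y)).getD 0)
          + 3 * max 0 ((PySem.List.max? (((PySem.Dict.counter l).items.filter (fun p => p.2 == 3)).map (fun p => p.1)) (fun y => y)).getD 0)
      else 0) := by
  have e2 := pv_pares_eq l 2
  have e3 := pv_pares_eq l 3
  rw [calcula_pontos_full_house]
  rw [pv_fh_loop l l false 0 false 0 0 (by ring)]
  simp only [Bool.false_or, e2, e3]
  by_cases h2 : (l.any fun i => decide (List.count i l = 2)) = true <;>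
    by_cases h3 : (l.any fun i => decide (List.count i l = 3)) = true
  · rw [if_pos ⟨h3, h2⟩,
      if_pos ⟨(pv_pares_ne_nil l 2).mpr h2, (pv_pares_ne_nil l 3).mpr h3⟩,
      pv_max_eq l 2 ((pv_pares_ne_nil l 2).mpr h2),
      pv_max_eq l 3 ((pv_pares_ne_nil l 3).mpr h3)]
    norm_num
  · rw [if_neg (fun hc => h3 hc.1),
      if_neg (fun hc => h3 ((pv_pares_ne_nil l 3).mp hc.2))]
  · rw [if_neg (fun hc => h2 hc.2),
      if_neg (fun hc => h2 ((pv_pares_ne_nil l 2).mp hc.1))]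
  · rw [if_neg (fun hc => h2 hc.2),
      if_neg (fun hc => h2 ((pv_pares_ne_nil l 2).mp hc.1))]

theorem pv_A_items (l : List Int) :
    calcula_pontos_regra_avancada l =
      [("cinco_iguais", calcula_pontos_quina l), ("full_house", calcula_pontos_full_house l),
       ("quadra", calcula_pontos_quadra l), ("sem_combinacao", calcula_pontos_soma l),
       ("sequencia_alta", calcula_pontos_sequencia_alta l), ("sequencia_baixa", calcula_pontos_sequencia_baixa l)] := by
  rfl

-- ===== VERDICT (by name: the statement is the Claim_ definition above) =====
theorem calcula_pontos_regra_avancada_spec : Claim_equal_calcula_pontos_regra_avancada := by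
  intro l _
  unfold Spec_calcula_pontos_regra_avancada
  rw [pv_A_items]
  show _ = calcula_pontos_regra_avancada_alt l
  unfold calcula_pontos_regra_avancada_alt
  rw [PySem.Dict.foldl_insert_getD_add_one_eq_counter]
  rw [pv_quina_eq, pv_quadra_eq, pv_soma_eq, pv_seqa_eq, pv_seqb_eq, pv_fh_eq]
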